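-- pv_equiv track=rewrite | github.com/sebastianspicker/outlook-email-rag | src/question_execution_waves.py | canonical_wave_id
-- ===== SOURCE A (Python) =====
-- def canonical_wave_id(value: str) -> str:
--     """Normalize user-facing wave identifiers to the internal canonical key."""
--     compact = "".join(ch for ch in str(value or "").strip().lower() if ch.isalnum())
--     aliases = {
--         "1": "wave_1",
--         "wave1": "wave_1",
--         "2": "wave_2",
--         "wave2": "wave_2",
--         "3": "wave_3",
--         "wave3": "wave_3",
--         "4": "wave_4",
--         "wave4": "wave_4",
--         "5": "wave_5",
--         "wave5": "wave_5",
--         "5a": "wave_5a",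
--         "wave5a": "wave_5a",
--         "5b": "wave_5b",
--         "wave5b": "wave_5b",
--         "6": "wave_6",
--         "wave6": "wave_6",
--         "7": "wave_7",
--         "wave7": "wave_7",
--         "8": "wave_8",
--         "wave8": "wave_8",
--         "9": "wave_9",
--         "wave9": "wave_9",
--         "10": "wave_10",
--         "wave10": "wave_10",
--     }
--     return aliases.get(compact, "")
-- ===== SOURCE B (Python) =====
-- def canonical_wave_id(value: str) -> str:
--     """Normalize user-facing wave identifiers to the internal canonical key."""
--     compact = "".join(ch for ch in str(value or "").strip().lower() if ch.isalnum())
--     token = compact.removeprefix("wave")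
--     if token in {"1", "2", "3", "4", "5", "6", "7", "8", "9", "10", "5a", "5b"}:
--         return "wave_" + token
--     return ""
-- ===== Notes on version B (the rewrite author's own statement) =====
-- stated objective: simpler
-- what changed: Replaces A's 24-entry alias dictionary lookup with a structural parse: strip one leading 'wave' from the normalized compact string and validate the remaining token against the 12 valid tokens, constructing 'wave_'+token.
import Mathlib
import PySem

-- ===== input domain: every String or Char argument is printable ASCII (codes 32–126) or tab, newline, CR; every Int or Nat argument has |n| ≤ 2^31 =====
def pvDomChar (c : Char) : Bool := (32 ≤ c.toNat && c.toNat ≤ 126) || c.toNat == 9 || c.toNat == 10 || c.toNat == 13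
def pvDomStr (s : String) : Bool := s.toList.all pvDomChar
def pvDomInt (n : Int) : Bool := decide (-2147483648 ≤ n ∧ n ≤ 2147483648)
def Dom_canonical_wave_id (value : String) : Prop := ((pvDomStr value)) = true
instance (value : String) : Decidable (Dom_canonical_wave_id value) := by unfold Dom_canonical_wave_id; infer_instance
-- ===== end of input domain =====

-- B replaces A's 24-entry alias table by stripping one leading "wave" from the compact
-- string and validating the remaining token against the 12 valid tokens (objective: simpler).

-- ===== PORT A =====
def canonical_wave_id (value : String) : String :=
  -- str(value or "") is the identity on strings (value if nonempty else "")
  let compact := String.ofList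
    (((PySem.Str.lower (PySem.Str.strip (if value = "" then "" else value))).toList).filter
      (fun ch => PySem.Str.isalnum ch))
  let aliases : PySem.Dict String String := PySem.Dict.ofList
    [("1", "wave_1"), ("wave1", "wave_1"), ("2", "wave_2"), ("wave2", "wave_2"),
     ("3", "wave_3"), ("wave3", "wave_3"), ("4", "wave_4"), ("wave4", "wave_4"),
     ("5", "wave_5"), ("wave5", "wave_5"), ("5a", "wave_5a"), ("wave5a", "wave_5a"),
     ("5b", "wave_5b"), ("wave5b", "wave_5b"), ("6", "wave_6"), ("wave6", "wave_6"),
     ("7", "wave_7"), ("wave7", "wave_7"), ("8", "wave_8"), ("wave8", "wave_8"),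
     ("9", "wave_9"), ("wave9", "wave_9"), ("10", "wave_10"), ("wave10", "wave_10")]
  aliases.getD compact ""

-- ===== PORT B =====
def canonical_wave_id_alt (value : String) : String :=
  let compact := String.ofList
    (((PySem.Str.lower (PySem.Str.strip (if value = "" then "" else value))).toList).filter
      (fun ch => PySem.Str.isalnum ch))
  -- compact.removeprefix("wave"): drop the 4 prefix chars iff compact starts with "wave" (exact)
  let token := if PySem.Str.startswith compact "wave" then String.ofList (compact.toList.drop 4) else compact
  if ["1", "2", "3", "4", "5", "6", "7", "8", "9", "10", "5a", "5b"].contains token then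
    "wave_" ++ token
  else ""

-- ===== PRECONDITION & SPEC =====
def Spec_canonical_wave_id (value : String) (out : String) : Prop := out = canonical_wave_id_alt value
instance (value : String) (out : String) : Decidable (Spec_canonical_wave_id value out) := by unfold Spec_canonical_wave_id; infer_instance

-- ===== CLAIM (what is proved, stated in full; the proofs are below) =====
def Claim_equal_canonical_wave_id : Prop := ∀ (value : String), Dom_canonical_wave_id value → Spec_canonical_wave_id value (canonical_wave_id value)

-- ===== LEMMAS AND PROOFS =====

-- the two programs agree as functions of the shared compact string
theorem lookup_eq_parse (c : String) :
    (PySem.Dict.ofList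
      [("1", "wave_1"), ("wave1", "wave_1"), ("2", "wave_2"), ("wave2", "wave_2"),
       ("3", "wave_3"), ("wave3", "wave_3"), ("4", "wave_4"), ("wave4", "wave_4"),
       ("5", "wave_5"), ("wave5", "wave_5"), ("5a", "wave_5a"), ("wave5a", "wave_5a"),
       ("5b", "wave_5b"), ("wave5b", "wave_5b"), ("6", "wave_6"), ("wave6", "wave_6"),
       ("7", "wave_7"), ("wave7", "wave_7"), ("8", "wave_8"), ("wave8", "wave_8"),
       ("9", "wave_9"), ("wave9", "wave_9"), ("10", "wave_10"), ("wave10", "wave_10")] :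
      PySem.Dict String String).getD c ""
    = (let token := if PySem.Str.startswith c "wave" then String.ofList (c.toList.drop 4) else c
       if ["1", "2", "3", "4", "5", "6", "7", "8", "9", "10", "5a", "5b"].contains token then
         "wave_" ++ token
       else "") := by
  by_cases hmem : c ∈ ["1", "wave1", "2", "wave2", "3", "wave3", "4", "wave4",
      "5", "wave5", "5a", "wave5a", "5b", "wave5b", "6", "wave6", "7", "wave7",
      "8", "wave8", "9", "wave9", "10", "wave10"]
  · fin_cases hmem <;> decide
  · have hL : (PySem.Dict.ofList
      [("1", "wave_1"), ("wave1", "wave_1"), ("2", "wave_2"), ("wave2", "wave_2"),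
       ("3", "wave_3"), ("wave3", "wave_3"), ("4", "wave_4"), ("wave4", "wave_4"),
       ("5", "wave_5"), ("wave5", "wave_5"), ("5a", "wave_5a"), ("wave5a", "wave_5a"),
       ("5b", "wave_5b"), ("wave5b", "wave_5b"), ("6", "wave_6"), ("wave6", "wave_6"),
       ("7", "wave_7"), ("wave7", "wave_7"), ("8", "wave_8"), ("wave8", "wave_8"),
       ("9", "wave_9"), ("wave9", "wave_9"), ("10", "wave_10"), ("wave10", "wave_10")] :
      PySem.Dict String String).getD c "" = "" := by
      have hfind : List.find? (fun p => p.1 == c)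
          [("1", "wave_1"), ("wave1", "wave_1"), ("2", "wave_2"), ("wave2", "wave_2"),
           ("3", "wave_3"), ("wave3", "wave_3"), ("4", "wave_4"), ("wave4", "wave_4"),
           ("5", "wave_5"), ("wave5", "wave_5"), ("5a", "wave_5a"), ("wave5a", "wave_5a"),
           ("5b", "wave_5b"), ("wave5b", "wave_5b"), ("6", "wave_6"), ("wave6", "wave_6"),
           ("7", "wave_7"), ("wave7", "wave_7"), ("8", "wave_8"), ("wave8", "wave_8"),
           ("9", "wave_9"), ("wave9", "wave_9"), ("10", "wave_10"), ("wave10", "wave_10")] = none := by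
        rw [List.find?_eq_none]
        intro x hx
        fin_cases hx <;>
          · simp only [beq_iff_eq]
            exact fun h => hmem (by simp [← h])
      simp [PySem.Dict.getD, PySem.Dict.get?, PySem.Dict.ofList, PySem.Dict.update,
        PySem.Dict.empty, PySem.Dict.insert, PySem.Dict.contains, hfind]
    rw [hL]
    have hc0 : c = String.ofList c.toList := by simp
    by_cases hsw : PySem.Str.startswith c "wave" = true
    · obtain ⟨t, ht⟩ : "wave".toList <+: c.toList := by
        rw [← PySem.Chars.startswith_iff]; simpa using hsw
      have hdrop : c.toList.drop 4 = t := by rw [← ht]; rfl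
      have hc : c = String.ofList ("wave".toList ++ t) := by rw [ht]; exact hc0
      simp only [if_pos hsw, hdrop]
      rw [if_neg]
      intro hcon
      simp only [List.contains_eq_mem, decide_eq_true_eq, List.mem_cons,
        List.not_mem_nil, or_false] at hcon
      rcases hcon with h|h|h|h|h|h|h|h|h|h|h|h <;>
        · rw [← String.toList_inj] at h
          simp only [String.toList_ofList] at h
          subst h
          exact hmem (by rw [hc]; decide)
    · simp only [if_neg hsw]
      rw [if_neg]
      intro hcon
      simp only [List.contains_eq_mem, decide_eq_true_eq, List.mem_cons,
        List.not_mem_nil, or_false] at hcon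
      rcases hcon with h|h|h|h|h|h|h|h|h|h|h|h <;>
        · subst h
          exact hmem (by decide)

theorem canonical_wave_id_spec : Claim_equal_canonical_wave_id := by
  intro value _
  unfold Spec_canonical_wave_id canonical_wave_id canonical_wave_id_alt
  exact lookup_eq_parse _
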